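-- pv_equiv track=rewrite | github.com/umbertopassanisi/SPI | SPI_37/SPI/procpy/source/spiLib.py | addValueMissingNace
-- ===== SOURCE A (Python) =====
-- def	addValueMissingNace(dicIndicator, dicNace, minStartYear):
-- 	#vectorMissing	=	[':']*(maxEndYear - minStartYear)
-- 	keyCountry		=	list(dicIndicator.keys())[0]
-- 	keyNace			=	list(dicIndicator[keyCountry].keys())[0]
-- 	vectorMissing	=	[':']*len(dicIndicator[keyCountry][keyNace])
-- 	countrySort		=	list(dicIndicator.keys())
-- 	countrySort.sort()
-- 	for country in countrySort:
-- 		naceKeySort	=	list(list(dicNace.keys()))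
-- 		naceKeySort.sort()
-- 		#on balaie la liste des nace pour savoir s'il en manque dans le dic des indicateurs
-- 		for nace	in naceKeySort:
-- 			try:
-- 				valeurExistante				=	dicIndicator[country][nace]
-- 			except:
-- 				dicIndicator[country][nace] =	vectorMissing
-- 	return dicIndicator
-- ===== SOURCE B (Python) =====
-- def addValueMissingNace(dicIndicator, dicNace, minStartYear):
--     firstNaces = dicIndicator[next(iter(dicIndicator))]
--     vectorMissing = [':'] * len(firstNaces[next(iter(firstNaces))])
--     naceSorted = sorted(dicNace)
--     for country, naces in dicIndicator.items():
--         dicIndicator[country] = {k: naces.get(k, vectorMissing)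
--                                  for k in list(naces) + naceSorted}
--     return dicIndicator
-- ===== Notes on version B (the rewrite author's own statement) =====
-- stated objective: idiomatic
-- what changed: A re-sorts the NACE keys for every country and probes each one with a try/except lookup, inserting misses into the existing inner dict; B sorts the NACE keys once and rebuilds each country's dict with a single dict comprehension over the existing keys followed by the sorted NACE keys, letting dict key-deduplication and .get(k, vectorMissing) supply the defaults - no missing-key detection at all.
import Mathlib
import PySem

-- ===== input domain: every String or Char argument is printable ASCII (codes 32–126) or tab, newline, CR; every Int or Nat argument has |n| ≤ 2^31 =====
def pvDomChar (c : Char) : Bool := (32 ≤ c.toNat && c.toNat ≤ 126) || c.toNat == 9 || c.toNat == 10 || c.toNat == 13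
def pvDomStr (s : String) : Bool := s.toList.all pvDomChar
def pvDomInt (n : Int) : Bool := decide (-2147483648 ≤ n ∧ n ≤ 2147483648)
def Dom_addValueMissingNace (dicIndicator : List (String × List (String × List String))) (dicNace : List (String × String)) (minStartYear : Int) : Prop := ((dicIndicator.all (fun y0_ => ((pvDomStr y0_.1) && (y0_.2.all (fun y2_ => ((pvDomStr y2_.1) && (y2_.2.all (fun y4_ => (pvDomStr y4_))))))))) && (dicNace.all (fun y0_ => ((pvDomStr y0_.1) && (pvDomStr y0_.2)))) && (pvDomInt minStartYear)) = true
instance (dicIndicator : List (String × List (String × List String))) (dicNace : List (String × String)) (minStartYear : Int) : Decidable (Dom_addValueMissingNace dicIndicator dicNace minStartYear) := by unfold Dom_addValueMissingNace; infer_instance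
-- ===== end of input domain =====

-- B replaces A's per-country try/except probe of every NACE key by a single dict-comprehension
-- rebuild of each country's dict over the existing keys followed by the once-sorted NACE keys
-- (objective: idiomatic). Python A mutates dicIndicator's inner dicts in place and returns it; B
-- reassigns fresh inner dicts into dicIndicator; the equivalence proved is about the RETURN value.


-- ===== PORT A =====
-- body of A's inner 'for nace in naceKeySort' loop: try dicIndicator[country][nace] / except: assign
def stepA (vectorMissing : List String) (country : String)
    (acc : PySem.Dict String (List (String × List String))) (nace : String) :
    PySem.Dict String (List (String × List String)) :=
  match (PySem.Dict.mk (acc.getD country [])).get? nace with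
  | some _ => acc
  | none => acc.insert country (((PySem.Dict.mk (acc.getD country [])).insert nace vectorMissing).items)

def addValueMissingNace (dicIndicator : List (String × List (String × List String))) (dicNace : List (String × String)) (minStartYear : Int) : List (String × List (String × List String)) :=
  let dI : PySem.Dict String (List (String × List String)) := PySem.Dict.mk dicIndicator
  match PySem.List.pyGet? dI.keys 0 with
  | none => dicIndicator      -- Python: IndexError here (excluded by Pre_)
  | some keyCountry =>
    let innerFirst := PySem.Dict.mk (dI.getD keyCountry [])
    match PySem.List.pyGet? innerFirst.keys 0 with
    | none => dicIndicator    -- Python: IndexError here (excluded by Pre_)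
    | some keyNace =>
      let vectorMissing : List String := List.replicate (innerFirst.getD keyNace []).length ":"
      let countrySort := PySem.List.sorted dI.keys (fun x => x)
      (countrySort.foldl (fun acc country =>
        (PySem.List.sorted (PySem.Dict.mk dicNace).keys (fun x => x)).foldl
          (stepA vectorMissing country) acc) dI).items

-- ===== PORT B =====
def addValueMissingNace_alt (dicIndicator : List (String × List (String × List String))) (dicNace : List (String × String)) (minStartYear : Int) : List (String × List (String × List String)) :=
  match dicIndicator with
  | [] => dicIndicator        -- Python: StopIteration here (excluded by Pre_)
  | (_, firstNaces) :: _ =>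
    match firstNaces with
    | [] => dicIndicator      -- Python: StopIteration here (excluded by Pre_)
    | (_, v0) :: _ =>
      let vectorMissing : List String := List.replicate v0.length ":"
      let naceSorted := PySem.List.sorted (PySem.Dict.mk dicNace).keys (fun x => x)
      dicIndicator.map (fun p =>
        (p.1, ((p.2.map Prod.fst ++ naceSorted).foldl
          (fun d k => d.insert k ((PySem.Dict.mk p.2).getD k vectorMissing))
          (PySem.Dict.mk [])).items))

-- ===== PRECONDITION & SPEC =====
-- Pre_ excludes the inputs on which Python A raises IndexError (an empty dicIndicator, or an empty
-- nace dict for the first country), and association lists with duplicate keys at any dict level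
-- (outer, inner, dicNace), which represent no Python dict input (dict keys are necessarily unique).
def Pre_addValueMissingNace (dicIndicator : List (String × List (String × List String))) (dicNace : List (String × String)) (minStartYear : Int) : Prop :=
  dicIndicator ≠ [] ∧ dicIndicator.headI.2 ≠ [] ∧
  (dicIndicator.map Prod.fst).Nodup ∧ (dicNace.map Prod.fst).Nodup ∧
  ∀ p ∈ dicIndicator, (p.2.map Prod.fst).Nodup
instance (dicIndicator : List (String × List (String × List String))) (dicNace : List (String × String)) (minStartYear : Int) : Decidable (Pre_addValueMissingNace dicIndicator dicNace minStartYear) := by unfold Pre_addValueMissingNace; infer_instance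

def pvWitness_addValueMissingNace : (List (String × List (String × List String))) × (List (String × String)) × Int :=
  ([("FR", [("A", ["1", "2"])]), ("DE", [("B", ["3", "4"])])], [("A", "agri"), ("B", "ind")], 2000)

def Spec_addValueMissingNace (dicIndicator : List (String × List (String × List String))) (dicNace : List (String × String)) (minStartYear : Int) (out : List (String × List (String × List String))) : Prop := out = addValueMissingNace_alt dicIndicator dicNace minStartYear
instance (dicIndicator : List (String × List (String × List String))) (dicNace : List (String × String)) (minStartYear : Int) (out : List (String × List (String × List String))) : Decidable (Spec_addValueMissingNace dicIndicator dicNace minStartYear out) := by unfold Spec_addValueMissingNace; infer_instance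

-- ===== CLAIM (what is proved, stated in full; the proofs are below) =====
def Claim_equal_addValueMissingNace : Prop := ∀ (dicIndicator : List (String × List (String × List String))) (dicNace : List (String × String)) (minStartYear : Int), Dom_addValueMissingNace dicIndicator dicNace minStartYear → Pre_addValueMissingNace dicIndicator dicNace minStartYear → Spec_addValueMissingNace dicIndicator dicNace minStartYear (addValueMissingNace dicIndicator dicNace minStartYear)

-- ===== LEMMAS AND PROOFS =====

-- the pairs A's inner loop appends for one country whose current nace list is I
def missingPairs (vm : List String) (N : List String) (I : List (String × List String)) : List (String × List String) :=
  (N.filter (fun k => decide (k ∉ I.map Prod.fst))).map (fun k => (k, vm))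

theorem pvWitness_ok : Dom_addValueMissingNace (pvWitness_addValueMissingNace.1) (pvWitness_addValueMissingNace.2.1) (pvWitness_addValueMissingNace.2.2) ∧ Pre_addValueMissingNace (pvWitness_addValueMissingNace.1) (pvWitness_addValueMissingNace.2.1) (pvWitness_addValueMissingNace.2.2) := by
  constructor <;> decide

-- with nodup keys, an item with key c is THE item with key c
lemma item_unique {ν : Type} (d : PySem.Dict String ν)
    {c : String} {I : ν}
    (hmem : (c, I) ∈ d.items) (hnd : d.keys.Nodup) :
    ∀ p ∈ d.items, p.1 = c → p = (c, I) := by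
  intro p hp hpc
  have h1 : d.getD c I = I := PySem.Dict.getD_of_mem_items d hmem hnd I
  have h2 : d.getD c I = p.2 := by
    have hmem2 : (c, p.2) ∈ d.items := by rw [← hpc]; exact hp
    exact PySem.Dict.getD_of_mem_items d hmem2 hnd I
  have h3 : p.2 = I := by rw [← h1, h2]
  rw [Prod.ext_iff]; exact ⟨hpc, h3⟩

-- A's inner loop over a nodup key list L appends the L-keys missing from country c's list I
lemma inner_fold_eq (vm : List String) (c : String) :
    ∀ (L : List String) (d : PySem.Dict String (List (String × List String)))
      (I : List (String × List String)),
      L.Nodup → d.keys.Nodup → (c, I) ∈ d.items →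
      L.foldl (stepA vm c) d =
        PySem.Dict.mk (d.items.map (fun p => if p.1 = c then (c, I ++ missingPairs vm L I) else p)) := by
  intro L
  induction L with
  | nil =>
    intro d I _ hnd hmem
    simp only [List.foldl_nil, missingPairs, List.filter_nil, List.map_nil, List.append_nil]
    have hl : d.items.map (fun p => if p.1 = c then (c, I) else p) = d.items := by
      have h := List.map_congr_left (l := d.items)
        (f := fun p => if p.1 = c then (c, I) else p) (g := id) (by
          intro p hp
          by_cases hpc : p.1 = c
          · simp only [hpc, if_true, id]
            exact (item_unique d hmem hnd p hp hpc).symm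
          · simp [hpc])
      simpa using h
    rw [hl]
  | cons k L' ih =>
    intro d I hL hnd hmem
    have hkL' : k ∉ L' := (List.nodup_cons.1 hL).1
    have hL' : L'.Nodup := (List.nodup_cons.1 hL).2
    have hgetD : d.getD c [] = I := PySem.Dict.getD_of_mem_items d hmem hnd []
    rw [List.foldl_cons]
    by_cases hkI : k ∈ I.map Prod.fst
    · -- the key is present: the step is a no-op
      have hsome : (PySem.Dict.mk I).get? k ≠ none := by
        rw [Ne, PySem.Dict.get?_eq_none_iff_not_mem_keys]
        simpa [PySem.Dict.keys_mk] using hkI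
      obtain ⟨w, hw⟩ := Option.ne_none_iff_exists'.1 hsome
      have hstep : stepA vm c d k = d := by
        simp only [stepA, hgetD, hw]
      rw [hstep, ih d I hL' hnd hmem]
      have hm : missingPairs vm (k :: L') I = missingPairs vm L' I := by
        simp [missingPairs, hkI]
      rw [hm]
    · -- the key is missing: the step appends (k, vm) to country c's list
      have hnone : (PySem.Dict.mk I).get? k = none := by
        rw [PySem.Dict.get?_eq_none_iff_not_mem_keys]
        simpa [PySem.Dict.keys_mk] using hkI
      have hcontk : (PySem.Dict.mk I).contains k = false := by
        rw [← Bool.not_eq_true, PySem.Dict.contains_iff_mem_keys]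
        simpa [PySem.Dict.keys_mk] using hkI
      have hins : ((PySem.Dict.mk I).insert k vm).items = I ++ [(k, vm)] :=
        PySem.Dict.items_insert_of_not_contains _ _ hcontk
      have hstep : stepA vm c d k = d.insert c (I ++ [(k, vm)]) := by
        simp only [stepA, hgetD, hnone, hins]
      have hcontc : d.contains c = true :=
        (PySem.Dict.contains_iff_mem_keys d c).2 (PySem.Dict.mem_keys_of_mem_items d hmem)
      have hd'items : (d.insert c (I ++ [(k, vm)])).items =
          d.items.map (fun p => if (p.1 == c) = true then (c, I ++ [(k, vm)]) else p) :=
        PySem.Dict.items_insert_of_contains d (I ++ [(k, vm)]) hcontc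
      have hd'keys : (d.insert c (I ++ [(k, vm)])).keys = d.keys :=
        PySem.Dict.keys_insert_of_contains d (I ++ [(k, vm)]) hcontc
      have hmem' : (c, I ++ [(k, vm)]) ∈ (d.insert c (I ++ [(k, vm)])).items := by
        rw [hd'items]
        exact List.mem_map.2 ⟨(c, I), hmem, by simp⟩
      rw [hstep, ih (d.insert c (I ++ [(k, vm)])) (I ++ [(k, vm)]) hL' (hd'keys ▸ hnd) hmem']
      apply congrArg PySem.Dict.mk
      rw [hd'items, List.map_map]
      apply List.map_congr_left
      intro p _
      have hmiss : missingPairs vm L' (I ++ [(k, vm)]) = missingPairs vm L' I := by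
        unfold missingPairs
        congr 1
        apply List.filter_congr
        intro x hx
        have hxk : x ≠ k := fun he => hkL' (he ▸ hx)
        simp [hxk]
      have hcons : missingPairs vm (k :: L') I = (k, vm) :: missingPairs vm L' I := by
        simp [missingPairs, hkI]
      by_cases hpc : p.1 = c
      · simp only [Function.comp_apply, hpc, beq_self_eq_true, if_true, hmiss, hcons]
        simp
      · simp [Function.comp, hpc]

-- A's outer loop updates each listed country independently
lemma outer_fold_eq (vm : List String) (N : List String) (hN : N.Nodup) :
    ∀ (C : List String) (d : PySem.Dict String (List (String × List String))),
      C.Nodup → d.keys.Nodup → (∀ c ∈ C, c ∈ d.keys) →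
      C.foldl (fun acc c => N.foldl (stepA vm c) acc) d =
        PySem.Dict.mk (d.items.map
          (fun p => if p.1 ∈ C then (p.1, p.2 ++ missingPairs vm N p.2) else p)) := by
  intro C
  induction C with
  | nil =>
    intro d _ _ _
    have hl : d.items.map
        (fun p => if p.1 ∈ ([] : List String) then (p.1, p.2 ++ missingPairs vm N p.2) else p) =
        d.items := by simp
    rw [List.foldl_nil, hl]
  | cons c C' ih =>
    intro d hC hnd hsub
    have hcC' : c ∉ C' := (List.nodup_cons.1 hC).1
    have hC' : C'.Nodup := (List.nodup_cons.1 hC).2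
    have hck : c ∈ d.keys := hsub c (List.mem_cons_self ..)
    have hkeys : d.keys = d.items.map Prod.fst := rfl
    obtain ⟨p0, hp0, hp0c⟩ := List.mem_map.1 (hkeys ▸ hck)
    have hmem : (c, p0.2) ∈ d.items := by
      have hp0eq : p0 = (c, p0.2) := by rw [Prod.ext_iff]; exact ⟨hp0c, rfl⟩
      rw [← hp0eq]; exact hp0
    rw [List.foldl_cons, inner_fold_eq vm c N d p0.2 hN hnd hmem]
    have hkeys1 : (PySem.Dict.mk (d.items.map
        (fun p => if p.1 = c then (c, p0.2 ++ missingPairs vm N p0.2) else p))).keys = d.keys := by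
      rw [PySem.Dict.keys_mk, hkeys, List.map_map]
      have hfst : (Prod.fst ∘ fun p : String × List (String × List String) =>
          if p.1 = c then (c, p0.2 ++ missingPairs vm N p0.2) else p) = Prod.fst := by
        funext p
        by_cases hpc : p.1 = c
        · simp [hpc]
        · simp [hpc]
      rw [show (fun x : String × List (String × List String) => x.1) = Prod.fst from rfl, hfst]
    rw [ih (PySem.Dict.mk (d.items.map
          (fun p => if p.1 = c then (c, p0.2 ++ missingPairs vm N p0.2) else p)))
        hC' (by rw [hkeys1]; exact hnd)
        (fun x hx => by rw [hkeys1]; exact hsub x (List.mem_cons_of_mem c hx))]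
    apply congrArg PySem.Dict.mk
    show (d.items.map _).map _ = d.items.map _
    rw [List.map_map]
    apply List.map_congr_left
    intro p hp
    by_cases hpc : p.1 = c
    · have hpeq : p = (c, p0.2) := item_unique d hmem hnd p hp hpc
      simp only [Function.comp_apply, if_true, hpeq, hcC']
      simp
    · simp only [Function.comp_apply, hpc, if_false, List.mem_cons]
      simp

-- B's comprehension, phase 1: folding insert over the dict's own keys rebuilds the dict
lemma build_phase1 (g : String → List String) :
    ∀ (rest pre : List (String × List String)),
      ((pre ++ rest).map Prod.fst).Nodup →
      (∀ p ∈ rest, g p.1 = p.2) →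
      (rest.map Prod.fst).foldl (fun d k => d.insert k (g k)) (PySem.Dict.mk pre)
        = PySem.Dict.mk (pre ++ rest) := by
  intro rest
  induction rest with
  | nil => intro pre _ _; simp
  | cons q rest' ih =>
    intro pre hnd hg
    obtain ⟨k, v⟩ := q
    have hk : k ∉ pre.map Prod.fst := by
      intro hmem
      have h2 : ((pre ++ (k, v) :: rest').map Prod.fst).Nodup := hnd
      simp only [List.map_append, List.nodup_append] at h2
      exact h2.2.2 k hmem k (by simp) rfl
    have hcont : (PySem.Dict.mk pre).contains k = false := by
      rw [← Bool.not_eq_true, PySem.Dict.contains_iff_mem_keys]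
      simpa [PySem.Dict.keys_mk] using hk
    have hins : ((PySem.Dict.mk pre).insert k (g k)).items = pre ++ [(k, g k)] :=
      PySem.Dict.items_insert_of_not_contains _ _ hcont
    have hgk : g k = v := hg (k, v) (List.mem_cons_self ..)
    have hstep : (PySem.Dict.mk pre).insert k (g k) = PySem.Dict.mk (pre ++ [(k, v)]) := by
      apply PySem.Dict.ext; rw [hins, hgk]
    rw [List.map_cons, List.foldl_cons, hstep,
        ih (pre ++ [(k, v)]) (by simpa using hnd) (fun p hp => hg p (List.mem_cons_of_mem _ hp))]
    simp

-- B's comprehension, phase 2: folding insert over the sorted NACE keys overwrites present keys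
-- with their own values and appends the missing ones with vm
lemma build_phase2 (vm : List String) (naces : List (String × List String))
    (hn : (naces.map Prod.fst).Nodup) :
    ∀ (N : List String), N.Nodup →
    ∀ (E : List (String × List String)),
      (∀ k ∈ N, k ∉ E.map Prod.fst) →
      ((naces ++ E).map Prod.fst).Nodup →
      N.foldl (fun d k => d.insert k ((PySem.Dict.mk naces).getD k vm)) (PySem.Dict.mk (naces ++ E))
        = PySem.Dict.mk (naces ++ E ++ missingPairs vm N naces) := by
  intro N
  induction N with
  | nil => intro _ _ _; simp [missingPairs]
  | cons k N' ih =>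
    intro hN E hdisj hnd
    have hkN' : k ∉ N' := (List.nodup_cons.1 hN).1
    have hN' : N'.Nodup := (List.nodup_cons.1 hN).2
    have hkE : k ∉ E.map Prod.fst := hdisj k (List.mem_cons_self ..)
    rw [List.foldl_cons]
    by_cases hkn : k ∈ naces.map Prod.fst
    · -- present: insert overwrites with the same value, items unchanged
      obtain ⟨p0, hp0, hp0k⟩ := List.mem_map.1 hkn
      have hnk : (PySem.Dict.mk naces).keys.Nodup := by
        simpa [PySem.Dict.keys_mk] using hn
      have hmem0 : (k, p0.2) ∈ naces := by
        have : p0 = (k, p0.2) := by rw [Prod.ext_iff]; exact ⟨hp0k, rfl⟩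
        rw [← this]; exact hp0
      have hval : (PySem.Dict.mk naces).getD k vm = p0.2 :=
        PySem.Dict.getD_of_mem_items (PySem.Dict.mk naces) hmem0 hnk vm
      have hcont : (PySem.Dict.mk (naces ++ E)).contains k = true := by
        rw [PySem.Dict.contains_iff_mem_keys]
        simp only [PySem.Dict.keys_mk, List.map_append, List.mem_append]
        exact Or.inl hkn
      have hinsitems := PySem.Dict.items_insert_of_contains
        (PySem.Dict.mk (naces ++ E)) ((PySem.Dict.mk naces).getD k vm) (k := k) hcont
      have hfix : (naces ++ E).map
          (fun p => if (p.1 == k) = true then (k, (PySem.Dict.mk naces).getD k vm) else p)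
          = naces ++ E := by
        have := List.map_congr_left (l := naces ++ E)
          (f := fun p => if (p.1 == k) = true then (k, (PySem.Dict.mk naces).getD k vm) else p)
          (g := id) (by
            intro p hp
            by_cases hpk : p.1 = k
            · rcases List.mem_append.1 hp with hpn | hpe
              · have : p = (k, p0.2) :=
                  item_unique (PySem.Dict.mk naces) (hmem0) hnk p (by exact hpn) hpk
                simp [this, hval, id]
              · exact absurd (hpk ▸ List.mem_map_of_mem hpe) hkE
            · simp [hpk])
        simpa using this
      have hstep : (PySem.Dict.mk (naces ++ E)).insert k ((PySem.Dict.mk naces).getD k vm)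
          = PySem.Dict.mk (naces ++ E) := by
        apply PySem.Dict.ext
        rw [hinsitems]
        exact hfix
      rw [hstep, ih hN' E (fun x hx => hdisj x (List.mem_cons_of_mem _ hx)) hnd]
      have : missingPairs vm (k :: N') naces = missingPairs vm N' naces := by
        simp [missingPairs, hkn]
      rw [this]
    · -- missing: insert appends (k, vm)
      have hval : (PySem.Dict.mk naces).getD k vm = vm := by
        apply PySem.Dict.getD_of_not_contains
        rw [← Bool.not_eq_true, PySem.Dict.contains_iff_mem_keys]
        simpa [PySem.Dict.keys_mk] using hkn
      have hcont : (PySem.Dict.mk (naces ++ E)).contains k = false := by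
        rw [← Bool.not_eq_true, PySem.Dict.contains_iff_mem_keys]
        simp only [PySem.Dict.keys_mk, List.map_append, List.mem_append]
        rintro (h | h)
        · exact hkn h
        · exact hkE h
      have hstep : (PySem.Dict.mk (naces ++ E)).insert k ((PySem.Dict.mk naces).getD k vm)
          = PySem.Dict.mk (naces ++ (E ++ [(k, vm)])) := by
        apply PySem.Dict.ext
        rw [PySem.Dict.items_insert_of_not_contains _ _ hcont, hval]
        simp
      have hdisj' : ∀ x ∈ N', x ∉ (E ++ [(k, vm)]).map Prod.fst := by
        intro x hx hmem
        rw [List.map_append] at hmem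
        rcases List.mem_append.1 hmem with h | h
        · exact hdisj x (List.mem_cons_of_mem _ hx) h
        · simp only [List.map_cons, List.map_nil, List.mem_singleton] at h
          exact hkN' (h ▸ hx)
      have hnd' : ((naces ++ (E ++ [(k, vm)])).map Prod.fst).Nodup := by
        have hk' : k ∉ (naces ++ E).map Prod.fst := by
          rw [List.map_append]; intro h
          rcases List.mem_append.1 h with h | h
          · exact hkn h
          · exact hkE h
        have hsing : ((naces ++ E).map Prod.fst ++ [k]).Nodup := by
          rw [List.nodup_append]
          exact ⟨hnd, List.nodup_singleton k, fun a ha b hb => by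
            simp only [List.mem_singleton] at hb
            subst hb; exact fun he => hk' (he ▸ ha)⟩
        have heq : (naces ++ (E ++ [(k, vm)])).map Prod.fst =
            (naces ++ E).map Prod.fst ++ [k] := by simp
        rw [heq]; exact hsing
      rw [hstep, ih hN' (E ++ [(k, vm)]) hdisj' hnd']
      have hcons : missingPairs vm (k :: N') naces = (k, vm) :: missingPairs vm N' naces := by
        simp [missingPairs, hkn]
      rw [hcons]
      apply congrArg PySem.Dict.mk
      simp

-- one row of B: the comprehension over (existing keys ++ sorted NACE keys) yields the existing
-- items followed by the missing sorted NACE keys with vm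
lemma build_row_eq (vm : List String) (N : List String) (hN : N.Nodup)
    (naces : List (String × List String)) (hn : (naces.map Prod.fst).Nodup) :
    ((naces.map Prod.fst ++ N).foldl
      (fun d k => d.insert k ((PySem.Dict.mk naces).getD k vm)) (PySem.Dict.mk [])).items
    = naces ++ missingPairs vm N naces := by
  rw [List.foldl_append]
  have h1 : (naces.map Prod.fst).foldl
      (fun d k => d.insert k ((PySem.Dict.mk naces).getD k vm)) (PySem.Dict.mk [])
      = PySem.Dict.mk naces := by
    have := build_phase1 (fun k => (PySem.Dict.mk naces).getD k vm) naces []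
      (by simpa using hn)
      (by
        intro p hp
        exact PySem.Dict.getD_of_mem_items (PySem.Dict.mk naces) (by
            obtain ⟨k, v⟩ := p; exact hp)
          (by simpa [PySem.Dict.keys_mk] using hn) vm)
    simpa using this
  rw [h1]
  have h2 := build_phase2 vm naces hn N hN [] (by simp) (by simpa using hn)
  simp only [List.append_nil] at h2
  rw [h2]

-- ===== VERDICT (by name: the statement is the Claim_ definition above) =====
theorem addValueMissingNace_spec : Claim_equal_addValueMissingNace := by
  unfold Claim_equal_addValueMissingNace
  intro dicIndicator dicNace minStartYear _hdom hpre
  obtain ⟨hne, hh, hndI, hndN, hndInner⟩ := hpre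
  unfold Spec_addValueMissingNace
  rcases dicIndicator with _ | ⟨⟨c0, i0⟩, rest⟩
  · exact absurd rfl hne
  simp only [List.headI] at hh
  rcases i0 with _ | ⟨⟨n0, v0⟩, irest⟩
  · exact absurd rfl hh
  -- reduce the head-element bookkeeping of both ports
  have hkeysI : (PySem.Dict.mk ((c0, (n0, v0) :: irest) :: rest)).keys =
      c0 :: rest.map Prod.fst := by
    simp [PySem.Dict.keys_mk]
  have hget1 : PySem.List.pyGet? (PySem.Dict.mk ((c0, (n0, v0) :: irest) :: rest)).keys 0 =
      some c0 := by
    rw [hkeysI]; exact PySem.List.pyGet?_zero_cons ..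
  have hgetD1 : (PySem.Dict.mk ((c0, (n0, v0) :: irest) :: rest)).getD c0 [] =
      (n0, v0) :: irest := by
    simp [PySem.Dict.getD_eq_get?_getD, PySem.Dict.get?_mk_cons]
  have hget2 : PySem.List.pyGet? (PySem.Dict.mk ((n0, v0) :: irest)).keys 0 = some n0 := by
    simp only [PySem.Dict.keys_mk, List.map_cons]
    exact PySem.List.pyGet?_zero_cons ..
  have hgetD2 : (PySem.Dict.mk ((n0, v0) :: irest)).getD n0 [] = v0 := by
    simp [PySem.Dict.getD_eq_get?_getD, PySem.Dict.get?_mk_cons]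
  simp only [addValueMissingNace, addValueMissingNace_alt, hget1, hgetD1, hget2, hgetD2]
  -- apply the loop lemmas
  have hndK : (PySem.Dict.mk ((c0, (n0, v0) :: irest) :: rest)).keys.Nodup := by
    rw [hkeysI]
    simpa using hndI
  have hndN' : (PySem.List.sorted (PySem.Dict.mk dicNace).keys (fun x => x)).Nodup := by
    apply ((PySem.List.sorted_perm (PySem.Dict.mk dicNace).keys (fun x => x) false).nodup_iff).mpr
    simpa [PySem.Dict.keys_mk] using hndN
  have hndC : (PySem.List.sorted (PySem.Dict.mk ((c0, (n0, v0) :: irest) :: rest)).keys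
      (fun x => x)).Nodup :=
    ((PySem.List.sorted_perm _ (fun x => x) false).nodup_iff).mpr hndK
  rw [outer_fold_eq (List.replicate v0.length ":")
      (PySem.List.sorted (PySem.Dict.mk dicNace).keys (fun x => x)) hndN'
      (PySem.List.sorted (PySem.Dict.mk ((c0, (n0, v0) :: irest) :: rest)).keys (fun x => x))
      (PySem.Dict.mk ((c0, (n0, v0) :: irest) :: rest))
      hndC hndK
      (fun c hc => (PySem.List.mem_sorted _ _ _ c).1 hc)]
  apply List.map_congr_left
  intro p hp
  have hpC : p.1 ∈ PySem.List.sorted (PySem.Dict.mk ((c0, (n0, v0) :: irest) :: rest)).keys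
      (fun x => x) := by
    rw [PySem.List.mem_sorted]
    exact List.mem_map_of_mem hp
  rw [if_pos hpC]
  rw [build_row_eq (List.replicate v0.length ":")
      (PySem.List.sorted (PySem.Dict.mk dicNace).keys (fun x => x)) hndN'
      p.2 (hndInner p hp)]
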